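-- pv_equiv track=rewrite | github.com/seekinggradient/auto-style-capture | scripts/scrape_scott_alexander.py | _extract_json_string
-- ===== SOURCE A (Python) =====
-- def _extract_json_string(text: str, start: int) -> str | None:
--     """Extract a JSON-encoded string value starting at `start` (after opening quote)."""
--     i = start
--     chars = []
--     while i < len(text):
--         c = text[i]
--         if c == '"':
--             break
--         if c == '\\':
--             i += 1
--             if i >= len(text):
--                 break
--             nc = text[i]
--             if nc == 'n':
--                 chars.append('\n')
--             elif nc == 't':
--                 chars.append('\t')
--             elif nc == '"':
--                 chars.append('"')
--             elif nc == '\\':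
--                 chars.append('\\')
--             elif nc == '/':
--                 chars.append('/')
--             elif nc == 'u':
--                 hex_str = text[i + 1:i + 5]
--                 try:
--                     chars.append(chr(int(hex_str, 16)))
--                 except (ValueError, IndexError):
--                     chars.append(nc)
--                 i += 4
--             else:
--                 chars.append(nc)
--         else:
--             chars.append(c)
--         i += 1
--     return "".join(chars) if chars else None
-- ===== SOURCE B (Python) =====
-- def _extract_json_string(text: str, start: int) -> str | None:
--     """Extract a JSON-encoded string value starting at `start` (after opening quote)."""
--     chars = []
--     i = start
--     n = len(text)
--     while True:
--         q = text.find('"', i)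
--         b = text.find('\\', i)
--         if q == -1 and b == -1:
--             chars.append(text[i:])
--             break
--         if b == -1 or (q != -1 and q < b):
--             chars.append(text[i:q])
--             break
--         chars.append(text[i:b])
--         j = b + 1
--         if j >= n:
--             break
--         nc = text[j]
--         if nc == 'n':
--             chars.append('\n')
--             i = j + 1
--         elif nc == 't':
--             chars.append('\t')
--             i = j + 1
--         elif nc == 'u':
--             try:
--                 chars.append(chr(int(text[j + 1:j + 5], 16)))
--             except ValueError:
--                 chars.append('u')
--             i = j + 5
--         else:
--             chars.append(nc)
--             i = j + 1
--     s = "".join(chars)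
--     return s if s else None
-- ===== Notes on version B (the rewrite author's own statement) =====
-- stated objective: faster
-- what changed: Replaces A's one-character-per-iteration scan with a loop that jumps straight to the next '"'/'\' boundary via str.find and appends whole plain-text slices at once, with the same escape dispatch at each backslash.
-- outside the precondition, e.g. on _extract_json_string('ab', -2): A returns 'abab', B returns 'ab'; on _extract_json_string('ab', -5): A raises IndexError, B returns 'ab'; on _extract_json_string('\\\\ud800', 0): A returns '\\ud800', B returns '\\ud800'
import Mathlib
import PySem

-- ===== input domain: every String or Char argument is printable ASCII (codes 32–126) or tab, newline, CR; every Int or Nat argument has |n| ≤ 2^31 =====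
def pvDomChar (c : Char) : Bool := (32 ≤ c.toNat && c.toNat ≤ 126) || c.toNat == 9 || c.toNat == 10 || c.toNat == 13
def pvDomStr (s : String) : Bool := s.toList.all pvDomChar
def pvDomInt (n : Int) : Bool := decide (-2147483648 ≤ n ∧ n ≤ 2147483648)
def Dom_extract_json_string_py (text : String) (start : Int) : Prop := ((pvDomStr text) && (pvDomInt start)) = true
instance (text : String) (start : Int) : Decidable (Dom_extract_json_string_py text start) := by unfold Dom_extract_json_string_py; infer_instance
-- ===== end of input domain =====

-- B replaces A's one-character-at-a-time scan by jumps to the next '"'/'\' boundary found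
-- with str.find, appending whole plain slices at once (objective: faster by constant factor).

-- B replaces A's one-character-at-a-time scan by jumps to the next '"'/'\' boundary found
-- with str.find, appending whole plain slices at once.

-- ===== PORT A =====
-- Literal port of A's while-loop: i advances by 1 (2 after an escape, 6 after \u), one char
-- is inspected and at most one char appended per iteration.  `fuel` is only a totality guard:
-- it starts at t.length and i grows by at least 1 per iteration, so the 0-arm (which returns
-- what the while-loop returns once i ≥ len) is reached only with i ≥ t.length.
-- `Char.ofNat v.toNat` is chr(v): exact for 0 ≤ v outside the surrogate range (Pre_ excludes
-- surrogate \u escapes); negative v (chr ValueError) takes the 'u' fallback like the Python.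
-- start.toNat in the wrapper is exact for 0 ≤ start (negative start is excluded by Pre_).
def pvLoopA (t : List Char) (fuel i : Nat) (acc : List Char) : Option String :=
  match fuel with
  | 0 => if acc = [] then none else some (String.ofList acc)
  | fuel' + 1 =>
    if _h : i < t.length then
      let c := t[i]
      if c = '"' then (if acc = [] then none else some (String.ofList acc))
      else if c = '\\' then
        if _h2 : i + 1 < t.length then
          let nc := t[i + 1]
          if nc = 'n' then pvLoopA t fuel' (i + 2) (acc ++ ['\n'])
          else if nc = 't' then pvLoopA t fuel' (i + 2) (acc ++ ['\t'])
          else if nc = '"' then pvLoopA t fuel' (i + 2) (acc ++ ['"'])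
          else if nc = '\\' then pvLoopA t fuel' (i + 2) (acc ++ ['\\'])
          else if nc = '/' then pvLoopA t fuel' (i + 2) (acc ++ ['/'])
          else if nc = 'u' then
            match PySem.Int.ofCharsBase? (PySem.List.slice t (some ((i : Int) + 2)) (some ((i : Int) + 6))) 16 with
            | some v => if 0 ≤ v then pvLoopA t fuel' (i + 6) (acc ++ [Char.ofNat v.toNat])
                        else pvLoopA t fuel' (i + 6) (acc ++ ['u'])
            | none => pvLoopA t fuel' (i + 6) (acc ++ ['u'])
          else pvLoopA t fuel' (i + 2) (acc ++ [nc])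
        else (if acc = [] then none else some (String.ofList acc))
      else pvLoopA t fuel' (i + 1) (acc ++ [c])
    else (if acc = [] then none else some (String.ofList acc))

def extract_json_string_py (text : String) (start : Int) : Option String :=
  pvLoopA text.toList text.toList.length start.toNat []

-- ===== PORT B =====
-- Literal port of B's while-loop: q/b are the next quote/backslash positions from str.find,
-- the whole plain slice up to the nearer one is appended in one step; escape dispatch as in
-- Source B.  `fuel` is again only a totality guard (i grows by at least 2 per iteration).
def pvLoopB (t : List Char) (fuel i : Nat) (acc : List Char) : Option String :=
  match fuel with
  | 0 => if acc = [] then none else some (String.ofList acc)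
  | fuel' + 1 =>
    let q := PySem.Chars.findFrom t ['"'] (i : Int) none
    let b := PySem.Chars.findFrom t ['\\'] (i : Int) none
    if q = -1 ∧ b = -1 then
      let acc2 := acc ++ PySem.List.slice t (some (i : Int)) none
      (if acc2 = [] then none else some (String.ofList acc2))
    else if b = -1 ∨ (q ≠ -1 ∧ q < b) then
      let acc2 := acc ++ PySem.List.slice t (some (i : Int)) (some q)
      (if acc2 = [] then none else some (String.ofList acc2))
    else
      let acc2 := acc ++ PySem.List.slice t (some (i : Int)) (some b)
      let j := b.toNat + 1
      if _h : j < t.length then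
        let nc := t[j]
        if nc = 'n' then pvLoopB t fuel' (j + 1) (acc2 ++ ['\n'])
        else if nc = 't' then pvLoopB t fuel' (j + 1) (acc2 ++ ['\t'])
        else if nc = 'u' then
          match PySem.Int.ofCharsBase? (PySem.List.slice t (some ((j : Int) + 1)) (some ((j : Int) + 5))) 16 with
          | some v => if 0 ≤ v then pvLoopB t fuel' (j + 5) (acc2 ++ [Char.ofNat v.toNat])
                      else pvLoopB t fuel' (j + 5) (acc2 ++ ['u'])
          | none => pvLoopB t fuel' (j + 5) (acc2 ++ ['u'])
        else pvLoopB t fuel' (j + 1) (acc2 ++ [nc])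
      else (if acc2 = [] then none else some (String.ofList acc2))

def extract_json_string_py_alt (text : String) (start : Int) : Option String :=
  pvLoopB text.toList text.toList.length start.toNat []

-- ===== PRECONDITION & SPEC =====
def pvIsHex (c : Char) : Bool := c.isDigit || ('a' ≤ c && c ≤ 'f') || ('A' ≤ c && c ≤ 'F')
def pvIsHighHex (c : Char) : Bool := (('8' ≤ c && c ≤ '9') || ('a' ≤ c && c ≤ 'f') || ('A' ≤ c && c ≤ 'F'))
def pvHasSurrogateEsc : List Char → Bool
  | [] => false
  | c :: rest =>
    (match c, rest with
     | '\\', 'u' :: d :: x :: y :: z :: _ =>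
       ((d == 'd' || d == 'D') && pvIsHighHex x && pvIsHex y && pvIsHex z)
     | _, _ => false) || pvHasSurrogateEsc rest

-- Pre_ excludes (a) negative start — outside the natural domain (start is a position after the
-- opening quote): A there reads through Python negative indexing (IndexError for start < -len,
-- and for -len ≤ start < 0 a wrap-around rescan that is an accident of the implementation) — and
-- (b) texts containing a \uDXXX surrogate escape, where A's Python result is a str holding a
-- lone UTF-16 surrogate, a value that cannot be represented as a Lean String.
def Pre_extract_json_string_py (text : String) (start : Int) : Prop :=
  0 ≤ start ∧ pvHasSurrogateEsc text.toList = false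
instance (text : String) (start : Int) : Decidable (Pre_extract_json_string_py text start) := by
  unfold Pre_extract_json_string_py; infer_instance

def pvWitness_extract_json_string_py : String × Int := ("ab\\n\\u0041c\"tail", 0)

def Spec_extract_json_string_py (text : String) (start : Int) (out : Option String) : Prop :=
  out = extract_json_string_py_alt text start
instance (text : String) (start : Int) (out : Option String) : Decidable (Spec_extract_json_string_py text start out) := by
  unfold Spec_extract_json_string_py; infer_instance

-- ===== CLAIM (what is proved, stated in full; the proofs are below) =====
def Claim_equal_extract_json_string_py : Prop :=
  ∀ (text : String) (start : Int), Dom_extract_json_string_py text start →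
    Pre_extract_json_string_py text start →
    Spec_extract_json_string_py text start (extract_json_string_py text start)

-- ===== LEMMAS AND PROOFS =====
-- first occurrence of a single character: head hit / head miss
theorem pvFind_cons_self (c : Char) (l : List Char) : PySem.Chars.find (c :: l) [c] = 0 := by
  have hinf : [c] <:+: c :: l := ⟨[], l, rfl⟩
  have h0 : (0:Int) ≤ PySem.Chars.find (c :: l) [c] := (PySem.Chars.find_nonneg_iff _ _).mpr hinf
  obtain ⟨hpre, hmin⟩ := PySem.Chars.find_spec h0
  by_contra hne
  have hpos : 0 < (PySem.Chars.find (c :: l) [c]).toNat := by omega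
  exact hmin 0 hpos ⟨l, rfl⟩

theorem pvFind_cons_ne {d c : Char} (hne : d ≠ c) (l : List Char) :
    PySem.Chars.find (d :: l) [c] =
      if PySem.Chars.find l [c] = -1 then -1 else 1 + PySem.Chars.find l [c] := by
  by_cases hF : PySem.Chars.find l [c] = -1
  · rw [if_pos hF]
    rw [PySem.Chars.find_eq_neg_one_iff] at hF
    apply (PySem.Chars.find_eq_neg_one_iff _ _).mpr
    intro hin
    rcases (List.infix_cons_iff).mp hin with hp | hi
    · rcases hp with ⟨s, hs⟩
      injection hs with h1 _
      exact hne h1.symm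
    · exact hF hi
  · rw [if_neg hF]
    have h0 : (0:Int) ≤ PySem.Chars.find l [c] := by
      have := PySem.Chars.neg_one_le_find l [c]
      omega
    obtain ⟨hpre, hmin⟩ := PySem.Chars.find_spec h0
    set m := (PySem.Chars.find l [c]).toNat with hm
    -- occurrence of [c] in d::l at m+1
    have hdrop : (d :: l).drop (m+1) = l.drop m := rfl
    have hinf : [c] <:+: d :: l := by
      refine List.infix_cons ?_
      exact hpre.isInfix.trans (List.drop_suffix m l).isInfix
    have h0' : (0:Int) ≤ PySem.Chars.find (d :: l) [c] := (PySem.Chars.find_nonneg_iff _ _).mpr hinf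
    obtain ⟨hpre', hmin'⟩ := PySem.Chars.find_spec h0'
    set F := (PySem.Chars.find (d :: l) [c]).toNat with hFdef
    have hFle : F = m + 1 := by
      rcases lt_trichotomy F (m+1) with hlt | heq | hgt
      · exfalso
        match hF2 : F, hlt with
        | 0, _ =>
          rw [List.drop_zero] at hpre'
          rcases hpre' with ⟨s, hs⟩
          injection hs with h1 _
          exact hne h1.symm
        | (k+1), hlt =>
          have hk : k < m := by omega
          exact hmin k hk hpre'
      · exact heq
      · exfalso
        exact hmin' (m+1) (by omega) (by rw [hdrop]; exact hpre)
    omega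

theorem pvFindFrom_len_le {t sub : List Char} (hsub : sub ≠ []) {i : Nat} (h : t.length ≤ i) :
    PySem.Chars.findFrom t sub (i : Int) none = -1 := by
  rcases Nat.lt_or_ge t.length i with hlt | hge
  · simp only [PySem.Chars.findFrom]
    have h1 : ¬ ((i:Int) < 0) := by omega
    simp only [if_neg h1]
    rw [if_pos (by exact_mod_cast hlt)]
  · have heq : i = t.length := by omega
    subst heq
    rw [PySem.Chars.findFrom_natCast t sub t.length le_rfl]
    have : PySem.Chars.find (List.drop t.length t) sub = -1 := by
      apply (PySem.Chars.find_eq_neg_one_iff _ _).mpr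
      rw [List.drop_length]
      intro hin
      exact hsub (List.eq_nil_of_infix_nil hin)
    rw [this]
    simp

theorem pvFindFrom_ge {t sub : List Char} (hsub : sub ≠ []) (i : Nat)
    (h : PySem.Chars.findFrom t sub (i : Int) none ≠ -1) :
    (i : Int) ≤ PySem.Chars.findFrom t sub (i : Int) none := by
  rcases Nat.lt_or_ge i t.length with hi | hi
  · exact (PySem.Chars.findFrom_natCast_spec t sub i (by omega) h).1
  · exact absurd (pvFindFrom_len_le hsub hi) h

-- a found boundary is a real occurrence of the searched character
theorem pvFindFrom_mem {t : List Char} {c : Char} {i : Nat}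
    (h : PySem.Chars.findFrom t [c] (i : Int) none ≠ -1) :
    (i : Int) ≤ PySem.Chars.findFrom t [c] (i : Int) none ∧
    ∃ (hlt : (PySem.Chars.findFrom t [c] (i : Int) none).toNat < t.length),
      t[(PySem.Chars.findFrom t [c] (i : Int) none).toNat] = c := by
  rcases Nat.lt_or_ge t.length i with hlt | hge
  · exact absurd (pvFindFrom_len_le (by simp) (by omega)) h
  · rcases Nat.lt_or_ge i t.length with hi | hi
    · obtain ⟨hle, hpre, _⟩ := PySem.Chars.findFrom_natCast_spec t [c] i (by omega) h
      set F := (PySem.Chars.findFrom t [c] (i:Int) none).toNat with hF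
      have hFlt : F < t.length := by
        by_contra hc
        rw [List.drop_eq_nil_of_le (by omega)] at hpre
        simp at hpre
      refine ⟨hle, hFlt, ?_⟩
      rcases hpre with ⟨s, hs⟩
      have := List.getElem_cons_drop (as := t) hFlt
      rw [← this] at hs
      injection hs with h1 _
      exact h1.symm
    · exact absurd (pvFindFrom_len_le (by simp) hi) h

theorem pvFindFrom_at {t : List Char} {c : Char} {i : Nat} (h : i < t.length) (hc : t[i] = c) :
    PySem.Chars.findFrom t [c] (i : Int) none = (i : Int) := by
  rw [PySem.Chars.findFrom_natCast t [c] i (by omega)]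
  have hd : List.drop i t = c :: List.drop (i+1) t := by
    rw [← List.getElem_cons_drop (as := t) h, hc]
  rw [hd, pvFind_cons_self]
  simp

theorem pvFindFrom_next {t : List Char} {c : Char} {i : Nat} (h : i < t.length) (hc : t[i] ≠ c) :
    PySem.Chars.findFrom t [c] (i : Int) none = PySem.Chars.findFrom t [c] (((i+1 : Nat)) : Int) none := by
  rw [PySem.Chars.findFrom_natCast t [c] i (by omega),
      PySem.Chars.findFrom_natCast t [c] (i+1) (by omega)]
  have hd : List.drop i t = t[i] :: List.drop (i+1) t :=
    (List.getElem_cons_drop (as := t) h).symm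
  rw [hd, pvFind_cons_ne hc]
  have hm1 := PySem.Chars.neg_one_le_find (List.drop (i+1) t) [c]
  by_cases hF : PySem.Chars.find (List.drop (i+1) t) [c] = -1
  · rw [if_pos hF, hF]; simp
  · rw [if_neg hF]
    have : ¬ (1 + PySem.Chars.find (List.drop (i+1) t) [c] = -1) := by omega
    rw [if_neg this, if_neg hF]
    push_cast
    ring

theorem pvSlice_drop (t : List Char) (i : Nat) : PySem.List.slice t (some (i : Int)) none = t.drop i := by
  simp only [PySem.List.slice, PySem.List.clampIdx]
  rcases Nat.lt_or_ge i (t.length + 1) with h | h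
  · have h1 : min ((i:Int)).toNat t.length = i := by omega
    simp only [if_neg (by omega : ¬ ((i:Int) < 0)), h1]
    exact List.take_of_length_le (by simp)
  · have h1 : min ((i:Int)).toNat t.length = t.length := by omega
    simp only [if_neg (by omega : ¬ ((i:Int) < 0)), h1]
    rw [List.drop_length, List.drop_eq_nil_of_le (by omega)]
    simp

theorem pvSlice_nil (t : List Char) (x : Int) : PySem.List.slice t (some x) (some x) = [] := by
  simp only [PySem.List.slice]
  simp

theorem pvSlice_cons {t : List Char} {i m : Nat} (hi : i < m) (hm : m ≤ t.length) :
    PySem.List.slice t (some (i : Int)) (some (m : Int)) =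
      t[i]'(by omega) :: PySem.List.slice t (some ((i : Int) + 1)) (some (m : Int)) := by
  have hcast : ((i : Int) + 1) = (((i+1 : Nat)) : Int) := by push_cast; ring
  rw [hcast]
  simp only [PySem.List.slice, PySem.List.clampIdx]
  simp only [if_neg (by omega : ¬ ((i:Int) < 0)), if_neg (by omega : ¬ ((m:Int) < 0)),
    if_neg (by omega : ¬ (((i+1:Nat):Int) < 0))]
  have h1 : min ((i:Int)).toNat t.length = i := by omega
  have h2 : min ((m:Int)).toNat t.length = m := by omega
  have h3 : min (((i+1:Nat):Int)).toNat t.length = i + 1 := by omega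
  rw [h1, h2, h3]
  rw [← List.getElem_cons_drop (as := t) (by omega : i < t.length)]
  have h4 : m - i = (m - (i+1)) + 1 := by omega
  rw [h4, List.take_succ_cons]

-- the loops once i has passed the end: any fuel, both return the join-or-None of acc
theorem pvLoopA_end {t : List Char} {i : Nat} (h : t.length ≤ i) (f : Nat) (acc : List Char) :
    pvLoopA t f i acc = (if acc = [] then none else some (String.ofList acc)) := by
  cases f with
  | zero => rfl
  | succ g =>
    rw [pvLoopA]
    rw [dif_neg (by omega)]

theorem pvLoopB_end {t : List Char} {i : Nat} (h : t.length ≤ i) (f : Nat) (acc : List Char) :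
    pvLoopB t f i acc = (if acc = [] then none else some (String.ofList acc)) := by
  cases f with
  | zero => rfl
  | succ g =>
    rw [pvLoopB]
    rw [pvFindFrom_len_le (by simp) h, pvFindFrom_len_le (by simp) h]
    rw [if_pos ⟨rfl, rfl⟩]
    rw [pvSlice_drop, List.drop_eq_nil_of_le h]
    simp

-- one plain (unescaped, non-quote) character: B's boundary step absorbs it into the slice
theorem pvStepPlain {t : List Char} {i : Nat} (h : i < t.length)
    (h1 : t[i] ≠ '"') (h2 : t[i] ≠ '\\') (f : Nat) (acc : List Char) :
    pvLoopB t (f+1) i acc = pvLoopB t (f+1) (i+1) (acc ++ [t[i]]) := by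
  rw [pvLoopB, pvLoopB]
  rw [← pvFindFrom_next h h1, ← pvFindFrom_next h h2]
  set q := PySem.Chars.findFrom t ['"'] (i : Int) none with hq
  set b := PySem.Chars.findFrom t ['\\'] (i : Int) none with hb
  have hdrop : t.drop i = t[i] :: t.drop (i+1) := (List.getElem_cons_drop (as := t) h).symm
  have hcast1 : ((i+1:Nat):Int) = (i:Int)+1 := by push_cast; ring
  by_cases hqb : q = -1 ∧ b = -1
  · rw [if_pos hqb, if_pos hqb]
    rw [pvSlice_drop, pvSlice_drop, hdrop]
    simp
  · rw [if_neg hqb, if_neg hqb]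
    by_cases hc2 : b = -1 ∨ (q ≠ -1 ∧ q < b)
    · rw [if_pos hc2, if_pos hc2]
      have hqne : q ≠ -1 := by
        rcases hc2 with hb1 | ⟨hq1, _⟩
        · intro hq1; exact hqb ⟨hq1, hb1⟩
        · exact hq1
      obtain ⟨hge, hlt, hat⟩ := pvFindFrom_mem (hq ▸ hqne)
      rw [← hq] at hge hlt
      have hat' : t[q.toNat]'hlt = '"' := hat
      have hne : i ≠ q.toNat := fun he => h1 ((getElem_congr rfl he h).trans hat')
      have hqcast : q = ((q.toNat : Nat) : Int) := by omega
      have hslice : PySem.List.slice t (some (i:Int)) (some q)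
          = t[i] :: PySem.List.slice t (some ((i+1:Nat):Int)) (some q) := by
        rw [hqcast, hcast1]
        exact pvSlice_cons (by omega) (by omega)
      have hacc : acc ++ PySem.List.slice t (some (i:Int)) (some q)
          = (acc ++ [t[i]]) ++ PySem.List.slice t (some ((i+1:Nat):Int)) (some q) := by
        rw [hslice]; simp
      rw [hacc]
    · rw [if_neg hc2, if_neg hc2]
      have hbne : b ≠ -1 := by
        intro hb1; exact hc2 (Or.inl hb1)
      obtain ⟨hge, hlt, hat⟩ := pvFindFrom_mem (hb ▸ hbne)
      rw [← hb] at hge hlt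
      have hat' : t[b.toNat]'hlt = '\\' := hat
      have hne : i ≠ b.toNat := fun he => h2 ((getElem_congr rfl he h).trans hat')
      have hbcast : b = ((b.toNat : Nat) : Int) := by omega
      have hslice : PySem.List.slice t (some (i:Int)) (some b)
          = t[i] :: PySem.List.slice t (some ((i+1:Nat):Int)) (some b) := by
        rw [hbcast, hcast1]
        exact pvSlice_cons (by omega) (by omega)
      have hacc : acc ++ PySem.List.slice t (some (i:Int)) (some b)
          = (acc ++ [t[i]]) ++ PySem.List.slice t (some ((i+1:Nat):Int)) (some b) := by
        rw [hslice]; simp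
      rw [hacc]

-- the two loops agree from any position, accumulator and sufficient fuels
theorem pvMain : ∀ (n : Nat) (t : List Char) (i : Nat) (acc : List Char) (fB fA : Nat),
    t.length - i ≤ n → t.length - i ≤ fB → t.length - i ≤ fA →
    pvLoopB t fB i acc = pvLoopA t fA i acc := by
  intro n
  induction n with
  | zero =>
    intro t i acc fB fA hn hB hA
    rw [pvLoopB_end (by omega), pvLoopA_end (by omega)]
  | succ n ih =>
    intro t i acc fB fA hn hB hA
    by_cases hi : i < t.length
    case neg =>
      rw [pvLoopB_end (by omega), pvLoopA_end (by omega)]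
    case pos =>
    obtain ⟨g, rfl⟩ : ∃ g, fB = g + 1 := ⟨fB - 1, by omega⟩
    obtain ⟨k, rfl⟩ : ∃ k, fA = k + 1 := ⟨fA - 1, by omega⟩
    by_cases hq : t[i] = '"'
    · -- closing quote: both finish with acc
      rw [pvLoopB, pvLoopA, dif_pos hi, if_pos hq]
      have hqq := pvFindFrom_at hi hq
      simp only [hqq]
      have hc1 : ¬ ((i:Int) = -1 ∧ PySem.Chars.findFrom t ['\\'] (i:Int) none = -1) := by
        intro ⟨h1, _⟩; omega
      rw [if_neg hc1]
      have hc2 : PySem.Chars.findFrom t ['\\'] (i:Int) none = -1 ∨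
          ((i:Int) ≠ -1 ∧ (i:Int) < PySem.Chars.findFrom t ['\\'] (i:Int) none) := by
        by_cases hb1 : PySem.Chars.findFrom t ['\\'] (i:Int) none = -1
        · exact Or.inl hb1
        · right
          obtain ⟨hge, hlt, hat⟩ := pvFindFrom_mem hb1
          have hne : (PySem.Chars.findFrom t ['\\'] (i:Int) none).toNat ≠ i := by
            intro he
            exact absurd ((getElem_congr rfl he.symm hi).trans hat) (by rw [hq]; decide)
          exact ⟨by omega, by omega⟩
      rw [if_pos hc2, pvSlice_nil]
      simp
    · by_cases hb : t[i] = '\\'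
      · -- escape: B finds the backslash at i, then both dispatch on t[i+1]
        rw [pvLoopB, pvLoopA, dif_pos hi, if_neg hq, if_pos hb]
        have hbb := pvFindFrom_at hi hb
        simp only [hbb]
        have hc1 : ¬ (PySem.Chars.findFrom t ['"'] (i:Int) none = -1 ∧ (i:Int) = -1) := by
          intro ⟨_, h2⟩; omega
        rw [if_neg hc1]
        have hc2 : ¬ ((i:Int) = -1 ∨ (PySem.Chars.findFrom t ['"'] (i:Int) none ≠ -1 ∧
            PySem.Chars.findFrom t ['"'] (i:Int) none < (i:Int))) := by
          rintro (h1 | ⟨hq1, hlt⟩)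
          · omega
          · have hge := pvFindFrom_ge (by simp) i hq1
            omega
        rw [if_neg hc2, pvSlice_nil]
        simp only [Int.toNat_natCast, List.append_nil]
        by_cases h2 : i + 1 < t.length
        · rw [dif_pos h2, dif_pos h2]
          have hcast : ((i+1:Nat):Int) + 1 = (i:Int) + 2 := by push_cast; ring
          have hcast5 : ((i+1:Nat):Int) + 5 = (i:Int) + 6 := by push_cast; ring
          simp only [hcast, hcast5]
          have hrec2 : t.length - (i + 1 + 1) ≤ n := by omega
          have hrec6 : t.length - (i + 1 + 5) ≤ n := by omega
          by_cases hn : t[i+1] = 'n'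
          · rw [if_pos hn, if_pos hn]
            exact ih t (i+1+1) _ g k hrec2 (by omega) (by omega)
          · rw [if_neg hn, if_neg hn]
            by_cases ht : t[i+1] = 't'
            · rw [if_pos ht, if_pos ht]
              exact ih t (i+1+1) _ g k hrec2 (by omega) (by omega)
            · rw [if_neg ht, if_neg ht]
              by_cases hu : t[i+1] = 'u'
              · rw [if_pos hu,
                    if_neg (show ¬ t[i+1] = '"' by rw [hu]; decide),
                    if_neg (show ¬ t[i+1] = '\\' by rw [hu]; decide),
                    if_neg (show ¬ t[i+1] = '/' by rw [hu]; decide),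
                    if_pos hu]
                rcases hval : PySem.Int.ofCharsBase? (PySem.List.slice t (some ((i:Int) + 2)) (some ((i:Int) + 6))) 16 with _ | v
                · exact ih t (i+1+5) _ g k hrec6 (by omega) (by omega)
                · dsimp only
                  by_cases hv : (0:Int) ≤ v
                  · rw [if_pos hv, if_pos hv]
                    exact ih t (i+1+5) _ g k hrec6 (by omega) (by omega)
                  · rw [if_neg hv, if_neg hv]
                    exact ih t (i+1+5) _ g k hrec6 (by omega) (by omega)
              · rw [if_neg hu]
                by_cases hqq : t[i+1] = '"'
                · rw [if_pos hqq, hqq]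
                  exact ih t (i+1+1) _ g k hrec2 (by omega) (by omega)
                · rw [if_neg hqq]
                  by_cases hbb2 : t[i+1] = '\\'
                  · rw [if_pos hbb2, hbb2]
                    exact ih t (i+1+1) _ g k hrec2 (by omega) (by omega)
                  · rw [if_neg hbb2]
                    by_cases hsl : t[i+1] = '/'
                    · rw [if_pos hsl, hsl]
                      exact ih t (i+1+1) _ g k hrec2 (by omega) (by omega)
                    · rw [if_neg hsl, if_neg hu]
                      exact ih t (i+1+1) _ g k hrec2 (by omega) (by omega)
        · rw [dif_neg h2, dif_neg h2]
      · -- plain character: one find/slice step of B covers this char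
        rw [pvStepPlain hi hq hb g acc, pvLoopA, dif_pos hi, if_neg hq, if_neg hb]
        exact ih t (i+1) (acc ++ [t[i]]) (g+1) k (by omega) (by omega) (by omega)

-- ===== VERDICT (by name: the statement is the Claim_ definition above) =====
theorem extract_json_string_py_spec : Claim_equal_extract_json_string_py := by
  intro text start _hdom _hpre
  unfold Spec_extract_json_string_py extract_json_string_py extract_json_string_py_alt
  exact (pvMain text.toList.length text.toList start.toNat [] text.toList.length text.toList.length
    (by omega) (by omega) (by omega)).symm
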